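-- pv_equiv track=rewrite | github.com/computer-science-crows/study-of-lda-method | src/CoherenceTestIwor.py | parse
-- ===== SOURCE A (Python) =====
-- def parse(lines):
--     texts = []
--
--     for line in lines:
--         line = line.strip()
--
--         lt = line.split(",")
--
--         # Potential ill-character cleaning
--         for i in range(len(lt)):
--             lt[i] = lt[i].replace('[', '')
--             lt[i] = lt[i].replace(']', '')
--             lt[i] = lt[i].replace('"', '')
--             lt[i] = lt[i].replace('\n', '')
--             lt[i] = lt[i].replace(' ', '')
--
--         texts.append(lt)
--
--     return texts
-- ===== SOURCE B (Python) =====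
-- def parse(lines):
--     texts = []
--     for line in lines:
--         toks = []
--         cur = []
--         for ch in line.strip():
--             if ch == ',':
--                 toks.append(''.join(cur))
--                 cur = []
--             elif ch not in '[]"\n ':
--                 cur.append(ch)
--         toks.append(''.join(cur))
--         texts.append(toks)
--     return texts
-- ===== Notes on version B (the rewrite author's own statement) =====
-- stated objective: alternative
-- what changed: B replaces A's split-then-repeatedly-replace pipeline with a single character-level state machine per line: one scan that flushes the current token on ',', drops stray characters, and appends all others, so split() and the five replace() passes disappear.
import Mathlib
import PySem

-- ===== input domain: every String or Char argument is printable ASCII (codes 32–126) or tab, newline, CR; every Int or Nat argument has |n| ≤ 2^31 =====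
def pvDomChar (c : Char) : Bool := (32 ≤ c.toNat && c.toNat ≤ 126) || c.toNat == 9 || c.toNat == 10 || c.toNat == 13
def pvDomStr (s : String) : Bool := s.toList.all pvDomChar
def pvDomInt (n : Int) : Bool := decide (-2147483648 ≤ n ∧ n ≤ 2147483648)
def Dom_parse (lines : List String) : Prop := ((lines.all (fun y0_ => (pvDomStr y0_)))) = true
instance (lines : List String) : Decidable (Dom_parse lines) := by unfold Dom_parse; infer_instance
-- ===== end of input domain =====

-- B replaces A's split-then-five-replaces pipeline with a single character-level state machine
-- per line (flush token on ',', drop stray chars, append others); alternative, same cost.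

-- ===== PORT A =====
-- the five sequential `lt[i] = lt[i].replace(…, '')` assignments of A's inner loop
def cleanTokA (t : List Char) : List Char :=
  let t := PySem.Chars.replace t ['['] []
  let t := PySem.Chars.replace t [']'] []
  let t := PySem.Chars.replace t ['"'] []
  let t := PySem.Chars.replace t ['\n'] []
  PySem.Chars.replace t [' '] []

def parse (lines : List String) : List (List String) :=
  lines.foldl (fun texts line =>
    let line := PySem.Chars.strip line.toList
    let lt := PySem.Chars.splitOn line [',']
    texts ++ [(lt.map cleanTokA).map String.ofList]) []

-- ===== PORT B =====
-- the state machine's per-character step: state = (finished tokens, current token)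
def stepB (st : List (List Char) × List Char) (ch : Char) : List (List Char) × List Char :=
  if ch = ',' then (st.1 ++ [st.2], [])
  else if ch = '[' ∨ ch = ']' ∨ ch = '"' ∨ ch = '\n' ∨ ch = ' ' then st
  else (st.1, st.2 ++ [ch])

def parse_alt (lines : List String) : List (List String) :=
  lines.foldl (fun texts line =>
    let p := (PySem.Chars.strip line.toList).foldl stepB ([], [])
    texts ++ [(p.1 ++ [p.2]).map String.ofList]) []

-- ===== PRECONDITION & SPEC =====
def Spec_parse (lines : List String) (out : List (List String)) : Prop := out = parse_alt lines
instance (lines : List String) (out : List (List String)) : Decidable (Spec_parse lines out) := by unfold Spec_parse; infer_instance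

-- ===== CLAIM =====
def Claim_equal_parse : Prop := ∀ (lines : List String), Dom_parse lines → Spec_parse lines (parse lines)

-- ===== LEMMAS AND PROOFS =====

-- characters dropped by the state machine (B) / deleted by A's replaces
def strayB (c : Char) : Bool := c == '[' || c == ']' || c == '"' || c == '\n' || c == ' '

-- `replace t [a] []` deletes every occurrence of `a`, i.e. it is a filter
theorem replace_go_single (a : Char) : ∀ (fuel : Nat) (l acc : List Char), l.length ≤ fuel →
    PySem.Chars.replace.go [a] [] fuel l acc = acc.reverse ++ l.filter (fun c => !(c == a)) := by
  intro fuel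
  induction fuel with
  | zero =>
    intro l acc h
    have : l = [] := List.eq_nil_of_length_eq_zero (Nat.le_zero.mp h)
    subst this
    simp [PySem.Chars.replace.go]
  | succ n ih =>
    intro l acc h
    cases l with
    | nil => simp [PySem.Chars.replace.go]
    | cons c t =>
      simp only [PySem.Chars.replace.go]
      by_cases hc : c = a
      · subst hc
        have hp : [c].isPrefixOf (c :: t) = true := by simp [List.isPrefixOf]
        rw [if_pos hp]
        simp only [List.length, List.drop_succ_cons, List.drop_zero, List.reverse_nil,
          List.nil_append]
        rw [ih t acc (by simpa using Nat.le_of_succ_le_succ h)]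
        simp [List.filter]
      · have hp : [a].isPrefixOf (c :: t) = false := by
          simp [List.isPrefixOf]
          exact fun h' => hc h'.symm
        rw [if_neg (by simp [hp])]
        rw [ih t (c :: acc) (by simpa using Nat.le_of_succ_le_succ h)]
        have hba : (c == a) = false := by simp [hc]
        simp [List.filter, hba]

theorem replace_single (a : Char) (t : List Char) :
    PySem.Chars.replace t [a] [] = t.filter (fun c => !(c == a)) := by
  simp only [PySem.Chars.replace, List.isEmpty_cons]
  exact replace_go_single a t.length t [] (Nat.le_refl _)

-- A's five replaces compose to one filter by the stray-character table
theorem cleanTokA_eq_filter (t : List Char) :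
    cleanTokA t = t.filter (fun c => !strayB c) := by
  simp only [cleanTokA, replace_single, List.filter_filter]
  apply List.filter_congr
  intro c _
  simp only [strayB, Bool.not_or]
  cases c == '[' <;> cases c == ']' <;> cases c == '"' <;> cases c == '\n' <;> cases c == ' ' <;> rfl

-- a direct recursion computing (first token, rest of the tokens) of a split on ','
def spC : List Char → List Char × List (List Char)
  | [] => ([], [])
  | c :: t =>
    let p := spC t
    if c = ',' then ([], p.1 :: p.2) else (c :: p.1, p.2)

theorem splitOn_go_comma : ∀ (fuel : Nat) (l cur : List Char) (acc : List (List Char)),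
    l.length ≤ fuel →
    PySem.Chars.splitOn.go [','] fuel l cur acc
      = acc.reverse ++ ((cur.reverse ++ (spC l).1) :: (spC l).2) := by
  intro fuel
  induction fuel with
  | zero =>
    intro l cur acc h
    have : l = [] := List.eq_nil_of_length_eq_zero (Nat.le_zero.mp h)
    subst this
    simp [PySem.Chars.splitOn.go, spC]
  | succ n ih =>
    intro l cur acc h
    cases l with
    | nil => simp [PySem.Chars.splitOn.go, spC]
    | cons c t =>
      simp only [PySem.Chars.splitOn.go]
      by_cases hc : c = ','
      · subst hc
        have hp : [','].isPrefixOf (',' :: t) = true := by simp [List.isPrefixOf]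
        rw [if_pos hp]
        simp only [List.length, List.drop_succ_cons, List.drop_zero]
        rw [ih t [] (cur.reverse :: acc) (by simpa using Nat.le_of_succ_le_succ h)]
        simp [spC]
      · have hp : [','].isPrefixOf (c :: t) = false := by
          simp [List.isPrefixOf]
          exact fun h' => hc h'.symm
        rw [if_neg (by simp [hp])]
        rw [ih t (c :: cur) acc (by simpa using Nat.le_of_succ_le_succ h)]
        simp [spC, hc]

theorem splitOn_comma (l : List Char) :
    PySem.Chars.splitOn l [','] = ((spC l).1 :: (spC l).2) := by
  simp only [PySem.Chars.splitOn]
  rw [splitOn_go_comma (l.length + 1) l [] [] (Nat.le_succ _)]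
  simp

-- the state machine computes the comma-split of the stray-filtered suffix
theorem scan_spec : ∀ (s : List Char) (acc : List (List Char)) (cur : List Char),
    (s.foldl stepB (acc, cur)).1 ++ [(s.foldl stepB (acc, cur)).2]
      = acc ++ ((cur ++ (spC (s.filter (fun c => !strayB c))).1)
          :: (spC (s.filter (fun c => !strayB c))).2) := by
  intro s
  induction s with
  | nil => intro acc cur; simp [spC]
  | cons c t ih =>
    intro acc cur
    by_cases hc : c = ','
    · subst hc
      have hs : (!strayB ',') = true := by decide
      simp only [List.foldl, stepB, List.filter, hs]
      rw [ih]
      simp [spC]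
    · by_cases hstray : c = '[' ∨ c = ']' ∨ c = '"' ∨ c = '\n' ∨ c = ' '
      · have hs : (!strayB c) = false := by
          simp only [strayB, Bool.not_eq_eq_eq_not, Bool.not_false]
          rcases hstray with h|h|h|h|h <;> subst h <;> decide
        simp only [List.foldl, stepB, if_neg hc, if_pos hstray, List.filter, hs]
        exact ih acc cur
      · have hs : (!strayB c) = true := by
          simp only [strayB, Bool.not_eq_eq_eq_not, Bool.not_true]
          push Not at hstray
          obtain ⟨h1,h2,h3,h4,h5⟩ := hstray
          simp [h1,h2,h3,h4,h5]
        simp only [List.foldl, stepB, if_neg hc, if_neg hstray, List.filter, hs]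
        rw [ih]
        simp [spC, hc]

-- filtering a non-comma-deleting predicate commutes with spC
theorem spC_filter (p : Char → Bool) (hp : p ',' = true) : ∀ (l : List Char),
    spC (l.filter p) = ((spC l).1.filter p, (spC l).2.map (fun t => t.filter p)) := by
  intro l
  induction l with
  | nil => simp [spC]
  | cons c t ih =>
    by_cases hc : c = ','
    · subst hc
      simp [List.filter, hp, spC, ih]
    · cases hpc : p c with
      | false => simp [List.filter, hpc, spC, hc, ih]
      | true => simp [List.filter, hpc, spC, hc, ih]

-- A's per-line result equals B's per-line result
theorem line_eq (line : String) :
    ((PySem.Chars.splitOn (PySem.Chars.strip line.toList) [',']).map cleanTokA).map String.ofList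
      = (((PySem.Chars.strip line.toList).foldl stepB ([], [])).1
          ++ [((PySem.Chars.strip line.toList).foldl stepB ([], [])).2]).map String.ofList := by
  rw [scan_spec]
  rw [splitOn_comma, spC_filter (fun c => !strayB c) (by decide)]
  simp [cleanTokA_eq_filter]

theorem foldl_append_map {α β : Type} (f : α → β) (l : List α) (init : List β) :
    l.foldl (fun acc x => acc ++ [f x]) init = init ++ l.map f := by
  induction l generalizing init with
  | nil => simp
  | cons x t ih => simp [List.foldl, ih]

-- ===== VERDICT =====
theorem parse_spec : Claim_equal_parse := by
  intro lines _
  unfold Spec_parse parse parse_alt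
  rw [foldl_append_map, foldl_append_map]
  simp only [List.nil_append]
  apply List.map_congr_left
  intro line _
  exact line_eq line
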